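-- pv_equiv track=rewrite | github.com/Devarsh-a/CTF_toolkit | cryptography/attacks/vigenere.py | _break_caesar_column
-- ===== SOURCE A (Python) =====
-- def _break_caesar_column(column: str):
--     """Break a Caesar-shifted column"""
--     best_shift = 0
--     best_score = float("-inf")
--     for shift in range(26):
--         decrypted = ""
--         for c in column:
--             if c.isalpha():
--                 base = ord("A") if c.isupper() else ord("a")
--                 decrypted += chr((ord(c) - base - shift) % 26 + base)
--             else:
--                 decrypted += c
--         score = sum(ch in " ETAOINSHRDLUetaoinshrdlu" for ch in decrypted)
--         if score > best_score:
--             best_score = score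
--             best_shift = shift
--     return best_shift
-- ===== SOURCE B (Python) =====
-- def _break_caesar_column(column: str):
--     """Break a Caesar-shifted column via a 26-bin histogram + correlation.
--
--     Non-letters pass through decryption unchanged, so only the space character
--     adds a constant (shift-independent) amount to every score; it cannot change
--     the argmax, hence only letters need counting.
--     """
--     hist = [0] * 26
--     for c in column:
--         if 'A' <= c <= 'Z':
--             hist[ord(c) - 65] += 1
--         elif 'a' <= c <= 'z':
--             hist[ord(c) - 97] += 1
--     good = [4, 19, 0, 14, 8, 13, 18, 7, 17, 3, 11, 20]  # E T A O I N S H R D L U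
--     best_shift = 0
--     best_score = -1
--     for shift in range(26):
--         score = sum(hist[(g + shift) % 26] for g in good)
--         if score > best_score:
--             best_score = score
--             best_shift = shift
--     return best_shift
-- ===== Notes on version B (the rewrite author's own statement) =====
-- stated objective: faster
-- what changed: Instead of re-decrypting the whole column for each of the 26 shifts and scoring the decrypted string, B makes one pass building a 26-bin letter histogram and scores each shift as a 12-term correlation against the good-letter indices (spaces contribute equally to every shift, so they are dropped without changing the argmax).
import Mathlib
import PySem

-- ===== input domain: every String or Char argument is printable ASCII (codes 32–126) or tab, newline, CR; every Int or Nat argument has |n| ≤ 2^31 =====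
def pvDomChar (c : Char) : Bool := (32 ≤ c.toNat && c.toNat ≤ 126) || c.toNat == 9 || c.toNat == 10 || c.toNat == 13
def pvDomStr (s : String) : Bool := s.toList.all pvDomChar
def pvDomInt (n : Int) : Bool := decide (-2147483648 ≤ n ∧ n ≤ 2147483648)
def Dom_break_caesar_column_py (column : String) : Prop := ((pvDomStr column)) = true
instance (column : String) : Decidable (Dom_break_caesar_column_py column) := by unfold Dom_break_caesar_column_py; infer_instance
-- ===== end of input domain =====

-- B replaces A's 26-fold re-decryption of the column by one histogram pass plus a
-- 12-term correlation per shift (spaces score equally under every shift, so B ignores them).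

-- ===== PORT A =====
-- the characters of " ETAOINSHRDLUetaoinshrdlu"
def pvGoodChars : List Char :=
  [' ', 'E', 'T', 'A', 'O', 'I', 'N', 'S', 'H', 'R', 'D', 'L', 'U',
   'e', 't', 'a', 'o', 'i', 'n', 's', 'h', 'r', 'd', 'l', 'u']

-- one character of the inner decryption loop
def pvDecChar (shift : Int) (c : Char) : Char :=
  if PySem.Chars.isalpha c then
    let base : Int := if PySem.Chars.isupper c then 65 else 97
    Char.ofNat (PySem.Int.mod ((c.toNat : Int) - base - shift) 26 + base).toNat
  else c

def break_caesar_column_py (column : String) : Int :=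
  let st := (PySem.List.pyRange 0 26 1).foldl
    (fun (st : Int × Option Int) shift =>
      -- decrypted built by appending one char at a time, as in A
      let decrypted := column.toList.foldl (fun acc c => acc ++ [pvDecChar shift c]) []
      let score : Int := (decrypted.map (fun ch => if ch ∈ pvGoodChars then (1 : Int) else 0)).sum
      -- best_score starts as float('-inf'), modelled as `none` (less than every int)
      match st.2 with
      | none => (shift, some score)
      | some bs => if bs < score then (shift, some score) else st)
    (0, none)
  st.1

-- ===== PORT B =====
-- indices of E T A O I N S H R D L U
def pvGood : List Int := [4, 19, 0, 14, 8, 13, 18, 7, 17, 3, 11, 20]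

-- one character of the histogram pass
def pvHistStep (h : List Int) (c : Char) : List Int :=
  if 'A' ≤ c ∧ c ≤ 'Z' then h.set (c.toNat - 65) (PySem.List.pyGetD h ((c.toNat : Int) - 65) 0 + 1)
  else if 'a' ≤ c ∧ c ≤ 'z' then h.set (c.toNat - 97) (PySem.List.pyGetD h ((c.toNat : Int) - 97) 0 + 1)
  else h

def break_caesar_column_py_alt (column : String) : Int :=
  let hist := column.toList.foldl pvHistStep (List.replicate 26 0)
  let st := (PySem.List.pyRange 0 26 1).foldl
    (fun (st : Int × Int) shift =>
      let score : Int := (pvGood.map (fun g => PySem.List.pyGetD hist (PySem.Int.mod ((g : Int) + shift) 26) 0)).sum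
      if st.2 < score then (shift, score) else st)
    (0, -1)
  st.1

-- ===== PRECONDITION & SPEC =====
def Spec_break_caesar_column_py (column : String) (out : Int) : Prop := out = break_caesar_column_py_alt column
instance (column : String) (out : Int) : Decidable (Spec_break_caesar_column_py column out) := by unfold Spec_break_caesar_column_py; infer_instance

-- ===== CLAIM (what is proved, stated in full; the proofs are below) =====
def Claim_equal_break_caesar_column_py : Prop := ∀ (column : String), Dom_break_caesar_column_py column → Spec_break_caesar_column_py column (break_caesar_column_py column)

-- ===== LEMMAS AND PROOFS =====

-- the letter bin of a character for B's histogram: 0–25 for ASCII letters, none otherwise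
def pvBin (c : Char) : Option Nat :=
  if 'A' ≤ c ∧ c ≤ 'Z' then some (c.toNat - 65)
  else if 'a' ≤ c ∧ c ≤ 'z' then some (c.toNat - 97)
  else none

-- A's per-shift score and B's per-shift score, named for the fold lemmas
def pvScoreA (cs : List Char) (s : Int) : Int :=
  ((cs.foldl (fun acc c => acc ++ [pvDecChar s c]) []).map (fun ch => if ch ∈ pvGoodChars then (1 : Int) else 0)).sum

def pvScoreB (cs : List Char) (s : Int) : Int :=
  (pvGood.map (fun g => PySem.List.pyGetD (cs.foldl pvHistStep (List.replicate 26 0)) (PySem.Int.mod ((g : Int) + s) 26) 0)).sum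

-- the (shift-independent) score contribution of the spaces in the column
def pvSpace (cs : List Char) : Int := (cs.map (fun c => if c = ' ' then (1 : Int) else 0)).sum

theorem pvStep_len (h : List Int) (c : Char) : (pvHistStep h c).length = h.length := by
  unfold pvHistStep; split_ifs <;> simp

theorem pvGetD_set (h : List Int) (i j : Nat) (hj : j < h.length) (v : Int) :
    PySem.List.pyGetD (h.set j v) (i : Int) 0 = if j = i then v else PySem.List.pyGetD h (i : Int) 0 := by
  simp [PySem.List.pyGetD_natCast]
  split_ifs with hji
  · subst hji; simp [List.getElem?_set_self hj]
  · simp [List.getElem?_set_ne hji]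

theorem pvStep_getD (h : List Int) (c : Char) (hlen : h.length = 26) (i : Nat) (hi : i < 26) :
    PySem.List.pyGetD (pvHistStep h c) (i : Int) 0
      = PySem.List.pyGetD h (i : Int) 0 + (if pvBin c == some i then (1 : Int) else 0) := by
  by_cases hU : 'A' ≤ c ∧ c ≤ 'Z'
  · obtain ⟨h1, h2⟩ := hU
    have hb1 : 65 ≤ c.toNat := h1
    have hb2 : c.toNat ≤ 90 := h2
    have hcast : ((c.toNat : Int) - 65) = ((c.toNat - 65 : Nat) : Int) := by omega
    simp only [pvHistStep, pvBin, if_pos (And.intro h1 h2), hcast]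
    rw [pvGetD_set h i (c.toNat - 65) (by omega) _]
    by_cases he : c.toNat - 65 = i
    · simp [he]
    · simp [he]
  · by_cases hL : 'a' ≤ c ∧ c ≤ 'z'
    · obtain ⟨h1, h2⟩ := hL
      have hb1 : 97 ≤ c.toNat := h1
      have hb2 : c.toNat ≤ 122 := h2
      have hcast : ((c.toNat : Int) - 97) = ((c.toNat - 97 : Nat) : Int) := by omega
      simp only [pvHistStep, pvBin, if_neg hU, if_pos (And.intro h1 h2), hcast]
      rw [pvGetD_set h i (c.toNat - 97) (by omega) _]
      by_cases he : c.toNat - 97 = i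
      · simp [he]
      · simp [he]
    · simp [pvHistStep, pvBin, hU, hL]

-- histogram characterisation: bin i of the histogram counts the letters binned to i
theorem pvHist_getD (cs : List Char) (h : List Int) (hlen : h.length = 26)
    (i : Nat) (hi : i < 26) :
    PySem.List.pyGetD (cs.foldl pvHistStep h) (i : Int) 0
      = PySem.List.pyGetD h (i : Int) 0 + (cs.countP (fun c => pvBin c == some i) : Int) := by
  induction cs generalizing h with
  | nil => simp
  | cons c cs ih =>
    simp only [List.foldl_cons, List.countP_cons]
    rw [ih _ (by rw [pvStep_len]; exact hlen), pvStep_getD h c hlen i hi]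
    by_cases hb : pvBin c == some i <;> simp [hb] <;> push_cast <;> ring

-- Fubini: summing per-good-letter counts over the column = summing per-char counts over the goods
theorem pvSwapSum {α β : Type} (L : List α) (cs : List β) (p : α → β → Bool) :
    (L.map (fun g => (cs.countP (p g) : Int))).sum
      = (cs.map (fun c => (L.countP (fun g => p g c) : Int))).sum := by
  induction cs with
  | nil => simp
  | cons c cs ih =>
    simp only [List.map_cons, List.sum_cons, ← ih, List.countP_cons]
    have : (L.map (fun g => ((cs.countP (p g) + if p g c then 1 else 0 : Nat) : Int))).sum
        = (L.map (fun g => ((cs.countP (p g) : Int) + if p g c then (1 : Int) else 0))).sum := by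
      congr 1; apply List.map_congr_left; intro g _; push_cast; split_ifs <;> simp
    rw [this, PySem.List.sum_map_add_int, PySem.List.sum_map_ite_one_zero]
    ring

-- every good index is in [0, 26)
theorem pvGood_lt : ∀ g ∈ pvGood, 0 ≤ g ∧ g < 26 := by decide

-- a good character is ' ' or an ASCII letter
theorem pvGoodChars_shape : ∀ x ∈ pvGoodChars, x = ' ' ∨ ('A' ≤ x ∧ x ≤ 'Z') ∨ ('a' ≤ x ∧ x ≤ 'z') := by
  intro x hx
  fin_cases hx <;> decide

-- which decrypted letters are good, by index (upper / lower case)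
theorem pvGoodIdx_upper : ∀ k : Fin 26, (Char.ofNat (k.val + 65) ∈ pvGoodChars) ↔ ((k.val : Int) ∈ pvGood) := by decide
theorem pvGoodIdx_lower : ∀ k : Fin 26, (Char.ofNat (k.val + 97) ∈ pvGoodChars) ↔ ((k.val : Int) ∈ pvGood) := by decide

-- counting the good indices hitting bin b under shift s
theorem pvCount26 : ∀ s b : Fin 26,
    (pvGood.countP (fun g => some b.val == some ((g.toNat + s.val) % 26)))
      = if (((b.val + 26 - s.val) % 26 : Nat) : Int) ∈ pvGood then 1 else 0 := by decide

-- Nat-level form of pvCount26, cast to Int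
theorem pvCount26' (sn b : Nat) (hs : sn < 26) (hb : b < 26) :
    ((pvGood.countP (fun g => some b == some ((g.toNat + sn) % 26)) : Nat) : Int)
      = if (((b + 26 - sn) % 26 : Nat) : Int) ∈ pvGood then 1 else 0 := by
  have h2 : (pvGood.countP (fun g => some b == some ((g.toNat + sn) % 26)))
      = if (((b + 26 - sn) % 26 : Nat) : Int) ∈ pvGood then 1 else 0 :=
    pvCount26 (Fin.mk sn hs) (Fin.mk b hb)
  rw [h2]; split_ifs <;> simp

-- B's score as a sum of counts
theorem pvScoreB_counts (cs : List Char) (s : Int) (h0 : 0 ≤ s) (h26 : s < 26) :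
    pvScoreB cs s
      = (pvGood.map (fun g => (cs.countP (fun c => pvBin c == some ((g.toNat + s.toNat) % 26)) : Int))).sum := by
  unfold pvScoreB
  refine congrArg List.sum (List.map_congr_left fun g hg => ?_)
  obtain ⟨hg0, hg26⟩ := pvGood_lt g hg
  have hm : PySem.Int.mod (g + s) 26 = (((g.toNat + s.toNat) % 26 : Nat) : Int) := by
    rw [PySem.Int.mod_eq_emod_of_pos (by norm_num)]; omega
  rw [hm, pvHist_getD cs _ (by simp) _ (by omega), PySem.List.pyGetD_natCast,
      List.getD_eq_getElem?_getD, List.getElem?_replicate]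
  split_ifs <;> simp

-- per-character score identity, for shifts 0 ≤ s < 26
theorem pvCharScore (s : Int) (h0 : 0 ≤ s) (h26 : s < 26) (c : Char) :
    (if pvDecChar s c ∈ pvGoodChars then (1 : Int) else 0)
      = (pvGood.countP (fun g => pvBin c == some ((g.toNat + s.toNat) % 26)) : Int)
        + (if c = ' ' then (1 : Int) else 0) := by
  have hsfin : s.toNat < 26 := by omega
  by_cases hU : 'A' ≤ c ∧ c ≤ 'Z'
  · obtain ⟨h1, h2⟩ := hU
    have hb1 : 65 ≤ c.toNat := h1
    have hb2 : c.toNat ≤ 90 := h2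
    have hsp : ¬ c = ' ' := by intro h; rw [h] at hb1; simp at hb1
    have hupper : PySem.Chars.isupper c = true := by
      simp [PySem.Chars.isupper]; exact ⟨h1, h2⟩
    have halpha : PySem.Chars.isalpha c = true := by
      have hdef : PySem.Chars.isalpha c = (PySem.Chars.isupper c || PySem.Chars.islower c) := rfl
      rw [hdef, hupper]; rfl
    have hbin : pvBin c = some (c.toNat - 65) := by simp [pvBin, And.intro h1 h2]
    have hd26 : ((c.toNat - 65) + 26 - s.toNat) % 26 < 26 := Nat.mod_lt _ (by norm_num)
    have hm : PySem.Int.mod ((c.toNat : Int) - 65 - s) 26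
        = ((((c.toNat - 65) + 26 - s.toNat) % 26 : Nat) : Int) := by
      rw [PySem.Int.mod_eq_emod_of_pos (by norm_num)]; omega
    have hdec : pvDecChar s c = Char.ofNat ((((c.toNat - 65) + 26 - s.toNat) % 26) + 65) := by
      simp only [pvDecChar, halpha, hupper, if_true]
      congr 1
      rw [hm]; omega
    have hmem : (pvDecChar s c ∈ pvGoodChars) ↔ ((((c.toNat - 65) + 26 - s.toNat) % 26 : Nat) : Int) ∈ pvGood := by
      rw [hdec]; exact pvGoodIdx_upper ⟨_, hd26⟩
    have hcnt : ((pvGood.countP (fun g => pvBin c == some ((g.toNat + s.toNat) % 26)) : Nat) : Int)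
        = if ((((c.toNat - 65) + 26 - s.toNat) % 26 : Nat) : Int) ∈ pvGood then 1 else 0 := by
      simp only [hbin]; exact pvCount26' s.toNat (c.toNat - 65) hsfin (by omega)
    rw [hcnt]
    by_cases hdg : ((((c.toNat - 65) + 26 - s.toNat) % 26 : Nat) : Int) ∈ pvGood
    · simp [hmem, hdg, hsp]
    · simp [hmem, hdg, hsp]
  · by_cases hL : 'a' ≤ c ∧ c ≤ 'z'
    · obtain ⟨h1, h2⟩ := hL
      have hb1 : 97 ≤ c.toNat := h1
      have hb2 : c.toNat ≤ 122 := h2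
      have hsp : ¬ c = ' ' := by intro h; rw [h] at hb1; simp at hb1
      have hlower : PySem.Chars.islower c = true := by
        simp [PySem.Chars.islower]; exact ⟨h1, h2⟩
      have halpha : PySem.Chars.isalpha c = true := by
        have hdef : PySem.Chars.isalpha c = (PySem.Chars.isupper c || PySem.Chars.islower c) := rfl
        rw [hdef, hlower]; simp
      have hnotZ : ¬ (c ≤ 'Z') := fun h => by
        have h' : c.toNat ≤ 90 := h; omega
      have hupper : PySem.Chars.isupper c = false := by
        simp [PySem.Chars.isupper, hnotZ]
      have hbin : pvBin c = some (c.toNat - 97) := by simp [pvBin, hU, And.intro h1 h2]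
      have hd26 : ((c.toNat - 97) + 26 - s.toNat) % 26 < 26 := Nat.mod_lt _ (by norm_num)
      have hm : PySem.Int.mod ((c.toNat : Int) - 97 - s) 26
          = ((((c.toNat - 97) + 26 - s.toNat) % 26 : Nat) : Int) := by
        rw [PySem.Int.mod_eq_emod_of_pos (by norm_num)]; omega
      have hdec : pvDecChar s c = Char.ofNat ((((c.toNat - 97) + 26 - s.toNat) % 26) + 97) := by
        simp only [pvDecChar, halpha, hupper, if_true, Bool.false_eq_true, if_false]
        congr 1
        rw [hm]; omega
      have hmem : (pvDecChar s c ∈ pvGoodChars) ↔ ((((c.toNat - 97) + 26 - s.toNat) % 26 : Nat) : Int) ∈ pvGood := by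
        rw [hdec]; exact pvGoodIdx_lower ⟨_, hd26⟩
      have hcnt : ((pvGood.countP (fun g => pvBin c == some ((g.toNat + s.toNat) % 26)) : Nat) : Int)
          = if ((((c.toNat - 97) + 26 - s.toNat) % 26 : Nat) : Int) ∈ pvGood then 1 else 0 := by
        simp only [hbin]; exact pvCount26' s.toNat (c.toNat - 97) hsfin (by omega)
      rw [hcnt]
      by_cases hdg : ((((c.toNat - 97) + 26 - s.toNat) % 26 : Nat) : Int) ∈ pvGood
      · simp [hmem, hdg, hsp]
      · simp [hmem, hdg, hsp]
    · have hupperF : PySem.Chars.isupper c = false := by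
        by_cases hA : 'A' ≤ c
        · have hZ : ¬ (c ≤ 'Z') := fun h => hU ⟨hA, h⟩
          simp [PySem.Chars.isupper, hZ]
        · simp [PySem.Chars.isupper, hA]
      have hlowerF : PySem.Chars.islower c = false := by
        by_cases ha : 'a' ≤ c
        · have hz : ¬ (c ≤ 'z') := fun h => hL ⟨ha, h⟩
          simp [PySem.Chars.islower, hz]
        · simp [PySem.Chars.islower, ha]
      have halpha : PySem.Chars.isalpha c = false := by
        have hdef : PySem.Chars.isalpha c = (PySem.Chars.isupper c || PySem.Chars.islower c) := rfl
        rw [hdef, hupperF, hlowerF]; rfl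
      have hdec : pvDecChar s c = c := by simp [pvDecChar, halpha]
      have hbin : pvBin c = none := by simp [pvBin, hU, hL]
      rw [hdec]
      simp only [hbin, show ∀ i : Nat, ((none : Option Nat) == some i) = false from fun _ => rfl,
        List.countP_false]
      by_cases hsp : c = ' '
      · subst hsp
        have hmem : (' ' ∈ pvGoodChars) := by decide
        simp [hmem]
      · have hnmem : c ∉ pvGoodChars := by
          intro hmem
          rcases pvGoodChars_shape c hmem with h | h | h
          · exact hsp h
          · exact hU h
          · exact hL h
        simp [hnmem, hsp]

-- A's score = B's score + the space contribution, for every shift of the loop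
theorem pvScore_eq (cs : List Char) (s : Int) (h0 : 0 ≤ s) (h26 : s < 26) :
    pvScoreA cs s = pvScoreB cs s + pvSpace cs := by
  unfold pvScoreA pvSpace
  rw [PySem.List.foldl_append_singleton_eq_map, List.nil_append, List.map_map,
      pvScoreB_counts cs s h0 h26, pvSwapSum, ← PySem.List.sum_map_add_int]
  congr 1
  apply List.map_congr_left
  intro c _
  exact pvCharScore s h0 h26 c

-- B's scores are nonnegative
theorem pvScoreB_nonneg (cs : List Char) (s : Int) (h0 : 0 ≤ s) (h26 : s < 26) :
    0 ≤ pvScoreB cs s := by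
  rw [pvScoreB_counts cs s h0 h26]
  apply List.sum_nonneg
  intro x hx
  simp only [List.mem_map] at hx
  obtain ⟨g, _, rfl⟩ := hx
  positivity

-- the two selection loops stay in lock-step once B's score is A's minus the constant
theorem pvLoop (SA SB : Int → Int) (K : Int)
    (hsc : ∀ s, 0 ≤ s → s < 26 → SA s = SB s + K) :
    ∀ (l : List Int), (∀ s ∈ l, 0 ≤ s ∧ s < 26) → ∀ (p : Int × Int),
    (l.foldl (fun st s =>
        match st.2 with
        | none => (s, some (SA s))
        | some b => if b < SA s then (s, some (SA s)) else st) (p.1, some (p.2 + K)))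
      = ((l.foldl (fun st s => if st.2 < SB s then (s, SB s) else st) p).1,
         some ((l.foldl (fun st s => if st.2 < SB s then (s, SB s) else st) p).2 + K)) := by
  intro l
  induction l with
  | nil => intro _ p; rfl
  | cons s l ih =>
    intro hmem p
    obtain ⟨hs0, hs26⟩ := hmem s (by simp)
    simp only [List.foldl_cons]
    rw [hsc s hs0 hs26]
    by_cases hlt : p.2 < SB s
    · have h1 : p.2 + K < SB s + K := by omega
      simp only [if_pos hlt, if_pos h1]
      exact ih (fun x hx => hmem x (by simp [hx])) (s, SB s)
    · have h1 : ¬ (p.2 + K < SB s + K) := by omega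
      simp only [if_neg hlt, if_neg h1]
      exact ih (fun x hx => hmem x (by simp [hx])) p

-- ===== VERDICT (by name: the statement is the Claim_ definition above) =====
theorem break_caesar_column_py_spec : Claim_equal_break_caesar_column_py := by
  intro column _
  unfold Spec_break_caesar_column_py
  set cs := column.toList with hcs
  have hA : break_caesar_column_py column
      = ((PySem.List.pyRange 0 26 1).foldl (fun st s =>
          match st.2 with
          | none => (s, some (pvScoreA cs s))
          | some b => if b < pvScoreA cs s then (s, some (pvScoreA cs s)) else st)
          ((0 : Int), (none : Option Int))).1 := rfl
  have hB : break_caesar_column_py_alt column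
      = ((PySem.List.pyRange 0 26 1).foldl (fun st s =>
          if st.2 < pvScoreB cs s then (s, pvScoreB cs s) else st)
          ((0 : Int), (-1 : Int))).1 := rfl
  rw [hA, hB]
  rw [show PySem.List.pyRange 0 26 1 = 0 :: PySem.List.pyRange 1 26 1 from
        PySem.List.pyRange_one_cons (by norm_num)]
  simp only [List.foldl_cons]
  have hfirstB : ((-1 : Int) < pvScoreB cs 0) := by
    have := pvScoreB_nonneg cs 0 (by norm_num) (by norm_num)
    omega
  simp only [if_pos hfirstB]
  have hsc0 := pvScore_eq cs 0 (by norm_num) (by norm_num)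
  have hmem : ∀ s ∈ PySem.List.pyRange 1 26 1, (0 : Int) ≤ s ∧ s < 26 := by
    intro s hs
    rw [PySem.List.mem_pyRange_one] at hs
    omega
  have := pvLoop (pvScoreA cs) (pvScoreB cs) (pvSpace cs)
      (fun s h0 h26 => pvScore_eq cs s h0 h26)
      (PySem.List.pyRange 1 26 1) hmem ((0 : Int), pvScoreB cs 0)
  rw [hsc0]
  rw [show ((0 : Int), some (pvScoreB cs 0 + pvSpace cs))
        = (((0 : Int), pvScoreB cs 0).1, some (((0 : Int), pvScoreB cs 0).2 + pvSpace cs)) from rfl]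
  rw [this]
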